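-- pv_equiv track=rewrite | github.com/pypi-data/pypi-mirror-402 | packages/algosystem/algosystem-0.1.9-py3-none-any.whl/algosystem/backtesting/dashboard/utils/config_parser.py | get_component_rows
-- ===== SOURCE A (Python) =====
-- def get_component_rows(components):
--     """
--     Group components by row
--
--     Parameters:
--     -----------
--     components : list
--         List of component configurations
--
--     Returns:
--     --------
--     dict
--         Dictionary with rows as keys and lists of components as values
--     """
--     rows = {}
--     for component in components:
--         row = component["position"]["row"]
--         if row not in rows:
--             rows[row] = []
--         rows[row].append(component)
--
--     # Sort components within each row by column
--     for row in rows: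
--         rows[row].sort(key=lambda x: x["position"]["col"])
--
--     return rows
-- ===== SOURCE B (Python) =====
-- def get_component_rows(components):
--     # Sort ALL components by column once (stable), then distribute into rows.
--     ordered = sorted(components, key=lambda c: c["position"]["col"])
--     rows = {}
--     for c in components:                       # lock in key order by first appearance
--         rows.setdefault(c["position"]["row"], [])
--     for c in ordered:                          # stable global sort => each row list sorted by col
--         rows[c["position"]["row"]].append(c)
--     return rows
-- ===== Notes on version B (the rewrite author's own statement) =====
-- stated objective: alternative
-- what changed: B replaces A's per-row in-place sorts with one global stable sort by column followed by a grouping pass (plus a setdefault pass that fixes key order by first appearance), relying on stability of sort to make each row's list come out sorted.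
import Mathlib
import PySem

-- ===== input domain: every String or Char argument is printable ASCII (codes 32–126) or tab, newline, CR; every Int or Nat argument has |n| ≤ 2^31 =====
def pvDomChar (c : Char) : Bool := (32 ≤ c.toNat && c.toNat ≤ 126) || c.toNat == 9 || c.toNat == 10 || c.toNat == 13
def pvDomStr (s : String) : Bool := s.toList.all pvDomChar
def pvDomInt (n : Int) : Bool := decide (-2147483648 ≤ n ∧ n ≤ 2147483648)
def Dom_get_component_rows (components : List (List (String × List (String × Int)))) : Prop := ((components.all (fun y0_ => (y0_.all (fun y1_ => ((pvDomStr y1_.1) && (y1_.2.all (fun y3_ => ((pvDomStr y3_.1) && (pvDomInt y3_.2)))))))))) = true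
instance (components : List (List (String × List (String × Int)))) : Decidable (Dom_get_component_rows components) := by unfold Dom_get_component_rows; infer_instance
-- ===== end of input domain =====

-- B replaces A's per-row in-place sorts with one global stable sort by column plus a
-- grouping pass (key order pinned by a setdefault pass); return values proved equal.

-- shared accessors: component["position"]["row"] / ["col"] (first-match dict lookup)
def rowOf (c : List (String × List (String × Int))) : Int :=
  (PySem.Dict.mk ((PySem.Dict.mk c).getD "position" [])).getD "row" 0

def colOf (c : List (String × List (String × Int))) : Int :=
  (PySem.Dict.mk ((PySem.Dict.mk c).getD "position" [])).getD "col" 0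

-- ===== PORT A =====
def get_component_rows (components : List (List (String × List (String × Int)))) : List (Int × List (List (String × List (String × Int)))) :=
  let rows := components.foldl (fun rows component =>
    let row := rowOf component
    let rows := if rows.contains row then rows else rows.insert row []
    rows.modify row [] (fun l => l ++ [component])) PySem.Dict.empty
  (rows.items.map (fun p => (p.1, PySem.List.sorted p.2 colOf false)))

-- ===== PORT B =====
def get_component_rows_alt (components : List (List (String × List (String × Int)))) : List (Int × List (List (String × List (String × Int)))) :=
  let ordered := PySem.List.sorted components colOf false
  let rows0 := components.foldl (fun d c => d.setdefault (rowOf c) []) PySem.Dict.empty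
  let rows := ordered.foldl (fun d c => d.modify (rowOf c) [] (fun l => l ++ [c])) rows0
  rows.items

-- ===== PRECONDITION & SPEC =====
-- Pre_ excludes exactly the inputs on which Python A raises KeyError: a component
-- whose dict lacks "position", or whose position dict lacks "row" or "col".
def Pre_get_component_rows (components : List (List (String × List (String × Int)))) : Prop :=
  (components.all (fun c =>
    (PySem.Dict.mk c).contains "position"
    && (PySem.Dict.mk ((PySem.Dict.mk c).getD "position" [])).contains "row"
    && (PySem.Dict.mk ((PySem.Dict.mk c).getD "position" [])).contains "col")) = true
instance (components : List (List (String × List (String × Int)))) : Decidable (Pre_get_component_rows components) := by unfold Pre_get_component_rows; infer_instance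

def pvWitness_get_component_rows : (List (List (String × List (String × Int)))) :=
  [[("position", [("row", 0), ("col", 1)])], [("position", [("row", 0), ("col", 0)])]]

def Spec_get_component_rows (components : List (List (String × List (String × Int)))) (out : List (Int × List (List (String × List (String × Int))))) : Prop := out = get_component_rows_alt components
instance (components : List (List (String × List (String × Int)))) (out : List (Int × List (List (String × List (String × Int))))) : Decidable (Spec_get_component_rows components out) := by
  unfold Spec_get_component_rows; exact @instDecidableEqList _ instDecidableEqProd out (get_component_rows_alt components)

-- ===== CLAIM (what is proved, stated in full; the proofs are below) =====
def Claim_equal_get_component_rows : Prop := ∀ (components : List (List (String × List (String × Int)))), Dom_get_component_rows components → Pre_get_component_rows components → Spec_get_component_rows components (get_component_rows components)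

-- ===== LEMMAS AND PROOFS =====

-- A's "if row not in rows: rows[row] = []" followed by an append is a single modify.
theorem cond_insert_modify {nu : Type} (d : PySem.Dict Int (List nu)) (r : Int) (f : List nu -> List nu) :
    (if d.contains r then d else d.insert r []).modify r [] f = d.modify r [] f := by
  by_cases h : d.contains r = true
  . simp [h]
  . simp only [Bool.not_eq_true] at h
    rw [if_neg (by simp [h])]
    show ((d.insert r []).insert r (f ((d.insert r []).getD r []))) = d.insert r (f (d.getD r []))
    rw [PySem.Dict.getD_insert_self, PySem.Dict.insert_insert_self,
      PySem.Dict.getD_of_not_contains _ _ h]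

-- grouping fold: the value at key r collects, in order, the elements mapping to r
theorem getD_foldl_group {beta : Type} (l : List beta) (key : beta -> Int)
    (d : PySem.Dict Int (List beta)) (r : Int) :
    (l.foldl (fun d c => d.modify (key c) [] (fun v => v ++ [c])) d).getD r []
      = d.getD r [] ++ l.filter (fun c => key c == r) := by
  induction l generalizing d with
  | nil => simp
  | cons c t ih =>
    simp only [List.foldl_cons, ih, List.filter_cons]
    rw [PySem.Dict.getD_modify]
    by_cases h : key c = r
    . simp [h]
    . simp [h, Ne.symm h]

-- setdefault fold: keys in first-appearance order
theorem keys_foldl_setdefault {beta : Type} (l : List beta) (key : beta -> Int)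
    (d : PySem.Dict Int (List beta)) :
    (l.foldl (fun d c => d.setdefault (key c) []) d).keys = PySem.Set.update d.keys (l.map key) := by
  induction l generalizing d with
  | nil => simp [PySem.Set.update]
  | cons c t ih =>
    simp only [List.foldl_cons, List.map_cons, ih, PySem.Set.update, List.foldl_cons]
    congr 1
    rw [PySem.Dict.keys_setdefault, PySem.Set.add]
    by_cases h : key c ∈ d.keys
    . rw [if_pos (by rw [PySem.Dict.contains_iff_mem_keys]; exact h),
        if_pos (by simpa using h)]
    . rw [if_neg (by rw [PySem.Dict.contains_iff_mem_keys]; exact h),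
        if_neg (by simpa using h)]

-- setdefault fold: every stored value is [] (or the key is absent)
theorem get?_foldl_setdefault {beta : Type} (l : List beta) (key : beta -> Int)
    (d : PySem.Dict Int (List beta)) (hd : ∀ r, d.get? r = none ∨ d.get? r = some []) (r : Int) :
    (l.foldl (fun d c => d.setdefault (key c) []) d).get? r = none ∨
    (l.foldl (fun d c => d.setdefault (key c) []) d).get? r = some [] := by
  induction l generalizing d with
  | nil => exact hd r
  | cons c t ih =>
    apply ih
    intro r'
    by_cases h : r' = key c
    . subst h
      rw [PySem.Dict.get?_setdefault_self]
      right
      rcases hd (key c) with h' | h' <;> simp [h']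
    . rw [PySem.Dict.get?_setdefault_of_ne _ _ h]
      exact hd r'

theorem getD_foldl_setdefault {beta : Type} (l : List beta) (key : beta -> Int) (r : Int) :
    (l.foldl (fun d c => d.setdefault (key c) []) (PySem.Dict.empty : PySem.Dict Int (List beta))).getD r [] = ([] : List beta) := by
  rcases get?_foldl_setdefault l key (PySem.Dict.empty : PySem.Dict Int (List beta)) (fun r' => Or.inl (PySem.Dict.get?_empty r')) r with h | h
  . exact PySem.Dict.getD_of_get?_eq_none _ _ h
  . exact PySem.Dict.getD_of_get?_eq_some _ _ h

-- stable insertion into a filtered sorted list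
theorem filter_insertBy {alpha : Type} (key : alpha -> Int) (p : alpha -> Bool) (x : alpha) (ys : List alpha)
    (h : ys.Pairwise (fun a b => key a ≤ key b)) :
    (PySem.List.insertBy (fun a b => decide (key a < key b)) x ys).filter p
      = if p x then PySem.List.insertBy (fun a b => decide (key a < key b)) x (ys.filter p)
        else ys.filter p := by
  induction ys with
  | nil =>
    by_cases hpx : p x = true <;> simp [PySem.List.insertBy, hpx]
  | cons y t ih =>
    rw [List.pairwise_cons] at h
    obtain ⟨hy, ht⟩ := h
    by_cases hb : key x < key y
    . rw [show PySem.List.insertBy (fun a b => decide (key a < key b)) x (y :: t) = x :: y :: t by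
        simp [PySem.List.insertBy, hb]]
      by_cases hpx : p x = true
      . by_cases hpy : p y = true
        . simp [hpx, hpy, PySem.List.insertBy, hb]
        . simp only [List.filter_cons, hpx, hpy, if_pos, Bool.false_eq_true, if_false]
          -- goal: x :: filter p t = insertBy x (filter p t)
          cases hf : t.filter p with
          | nil => simp [PySem.List.insertBy]
          | cons z zs =>
            have hz : z ∈ t := List.mem_of_mem_filter (hf ▸ List.mem_cons_self ..)
            have : key x < key z := lt_of_lt_of_le hb (hy z hz)
            simp [PySem.List.insertBy, this]
      . simp [List.filter_cons, hpx]
    . rw [show PySem.List.insertBy (fun a b => decide (key a < key b)) x (y :: t)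
          = y :: PySem.List.insertBy (fun a b => decide (key a < key b)) x t by
        simp [PySem.List.insertBy, hb]]
      rw [List.filter_cons, List.filter_cons]
      rw [ih ht]
      by_cases hpx : p x = true
      . by_cases hpy : p y = true
        . simp only [hpx, hpy, if_pos]
          rw [show PySem.List.insertBy (fun a b => decide (key a < key b)) x (y :: t.filter p)
              = y :: PySem.List.insertBy (fun a b => decide (key a < key b)) x (t.filter p) by
            simp [PySem.List.insertBy, hb]]
        . simp [hpx, hpy]
      . simp [hpx]

-- one sorted-insert step of the insertion sort
theorem sorted_append_singleton {alpha : Type} (key : alpha -> Int) (xs : List alpha) (x : alpha) :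
    PySem.List.sorted (xs ++ [x]) key false
      = PySem.List.insertBy (fun a b => decide (key a < key b)) x (PySem.List.sorted xs key false) := by
  rw [PySem.List.sorted_eq_foldl_insertBy, PySem.List.sorted_eq_foldl_insertBy, List.foldl_append]
  rfl

-- filtering commutes with the stable sort
theorem filter_sorted {alpha : Type} (key : alpha -> Int) (p : alpha -> Bool) (xs : List alpha) :
    (PySem.List.sorted xs key false).filter p = PySem.List.sorted (xs.filter p) key false := by
  induction xs using List.reverseRecOn with
  | nil => simp [PySem.List.sorted]
  | append_singleton xs x ih =>
    rw [sorted_append_singleton, List.filter_append, List.filter_cons, List.filter_nil,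
      filter_insertBy key p x _ (PySem.List.sorted_pairwise xs key)]
    by_cases hpx : p x = true
    . simp only [hpx, ite_true]
      rw [sorted_append_singleton key (List.filter p xs) x, ih]
    . simp [hpx, ih]

-- ===== VERDICT (by name: the statement is the Claim_ definition above) =====
theorem get_component_rows_spec : Claim_equal_get_component_rows := by
  intro components _ _
  show get_component_rows components = get_component_rows_alt components
  unfold get_component_rows get_component_rows_alt
  simp only [cond_insert_modify]
  set dA := components.foldl (fun d c => d.modify (rowOf c) [] (fun l => l ++ [c])) PySem.Dict.empty with hdA
  set rows0 := components.foldl (fun d c => d.setdefault (rowOf c) []) PySem.Dict.empty with hrows0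
  set ordered := PySem.List.sorted components colOf false with hordered
  set dB := ordered.foldl (fun d c => d.modify (rowOf c) [] (fun l => l ++ [c])) rows0 with hdB
  have hkA : dA.keys = PySem.Set.ofList (components.map rowOf) := by
    rw [hdA, PySem.Dict.keys_foldl_modify_key components rowOf [] (fun _ c => (fun l => l ++ [c]))]
    rw [PySem.Set.update_eq_append_filter]
    simp [PySem.Dict.keys_empty]
  have hk0 : rows0.keys = PySem.Set.ofList (components.map rowOf) := by
    rw [hrows0, keys_foldl_setdefault, PySem.Set.update_eq_append_filter]
    simp [PySem.Dict.keys_empty]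
  have hkB : dB.keys = rows0.keys := by
    rw [hdB, PySem.Dict.keys_foldl_modify_key ordered rowOf [] (fun _ c => (fun l => l ++ [c]))]
    rw [PySem.Set.update_eq_append_filter]
    have : (PySem.Set.ofList (ordered.map rowOf)).filter (fun y => !PySem.Set.contains rows0.keys y) = [] := by
      rw [List.filter_eq_nil_iff]
      intro y hy
      have : y ∈ components.map rowOf := by
        rcases List.mem_map.mp ((PySem.Set.mem_ofList _ _).mp hy) with ⟨c, hc, rfl⟩
        exact List.mem_map.mpr ⟨c, (PySem.List.mem_sorted _ _ _ _).mp hc, rfl⟩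
      simp [PySem.Set.contains, hk0, (PySem.Set.mem_ofList _ _).mpr this]
    rw [this, List.append_nil]
  have hnA : dA.keys.Nodup := hkA ▸ PySem.Set.nodup_ofList _
  have hnB : dB.keys.Nodup := (hkB.trans hk0) ▸ PySem.Set.nodup_ofList _
  rw [PySem.Dict.items_eq_map_keys dA hnA [], PySem.Dict.items_eq_map_keys dB hnB []]
  rw [hkA, hkB, hk0, List.map_map]
  apply List.map_congr_left
  intro r _
  simp only [Function.comp_apply]
  congr 1
  rw [hdA, getD_foldl_group components rowOf PySem.Dict.empty r,
    hdB, getD_foldl_group ordered rowOf rows0 r,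
    hrows0, getD_foldl_setdefault components rowOf r]
  rw [PySem.Dict.getD_empty]
  rw [hordered, filter_sorted colOf (fun c => rowOf c == r) components]
  simp
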